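-- pv_equiv track=rewrite | github.com/ad3002/aindex | tests/analyze_kmers.py | analyze_kmers
-- ===== SOURCE A (Python) =====
-- from collections import defaultdict
-- from typing import Dict, List, Tuple, Set
--
-- def reverse_complement(seq: str) -> str:
--     """Get the reverse complement of a DNA sequence."""
--     complement = {'A': 'T', 'T': 'A', 'G': 'C', 'C': 'G', 'N': 'N'}
--     return ''.join(complement.get(base, 'N') for base in reversed(seq))
--
-- def get_canonical_kmer(kmer: str) -> str:
--     """Get the canonical form of a kmer (lexicographically smallest of direct and reverse)."""
--     rev_comp = reverse_complement(kmer)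
--     return min(kmer, rev_comp)
--
-- def is_valid_kmer(kmer: str) -> bool:
--     """Check if the kmer contains only valid nucleotides (A, T, G, C)."""
--     return all(base in 'ATGC' for base in kmer)
--
-- def analyze_kmers(sequences: List[str], k: int = 23) -> Tuple[Dict[str, int], Dict[str, List[Tuple[int, int, int]]]]:
--     """
--     Analyze kmers in sequences.
--
--     Args:
--         sequences: List of DNA sequences
--         k: Kmer length
--
--     Returns:
--         Tuple of:
--         - Dictionary kmer -> frequency
--         - Dictionary kmer -> list of positions (read_number, position, direction)
--     """
--     kmer_counts = defaultdict(int)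
--     kmer_positions = defaultdict(list)
--
--     for read_id, seq in enumerate(sequences):
--         # Forward direction
--         for pos in range(len(seq) - k + 1):
--             kmer = seq[pos:pos + k]
--
--             if not is_valid_kmer(kmer):
--                 continue
--
--             canonical_kmer = get_canonical_kmer(kmer)
--             kmer_counts[canonical_kmer] += 1
--
--             # Determine direction: 0 - forward, 1 - reverse
--             direction = 0 if kmer == canonical_kmer else 1
--             kmer_positions[canonical_kmer].append((read_id, pos, direction))
--
--     return dict(kmer_counts), dict(kmer_positions)
-- ===== SOURCE B (Python) =====
-- def reverse_complement(seq: str) -> str: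
--     """Get the reverse complement of a DNA sequence."""
--     complement = {'A': 'T', 'T': 'A', 'G': 'C', 'C': 'G', 'N': 'N'}
--     return ''.join(complement.get(base, 'N') for base in reversed(seq))
--
--
-- def analyze_kmers(sequences, k=23):
--     """Count canonical k-mers and their positions.
--
--     A running run-length of valid bases decides window validity, replacing the
--     per-window validity rescan: a window is valid exactly when the run of
--     A/T/G/C characters ending at its last base covers it."""
--     kmer_counts = {}
--     kmer_positions = {}
--     for read_id, seq in enumerate(sequences):
--         # runs[i] = length of the maximal run of A/T/G/C characters ending at i
--         runs = []
--         cur = 0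
--         for ch in seq:
--             cur = cur + 1 if ch in 'ATGC' else 0
--             runs.append(cur)
--         # a window is valid exactly when the run ending at its last base covers it
--         for end, run in enumerate(runs):
--             if run >= k:
--                 pos = end - k + 1
--                 kmer = seq[pos:pos + k]
--                 rc = reverse_complement(kmer)
--                 canonical = kmer if kmer <= rc else rc
--                 kmer_counts[canonical] = kmer_counts.get(canonical, 0) + 1
--                 kmer_positions.setdefault(canonical, []).append(
--                     (read_id, pos, 0 if kmer == canonical else 1))
--     return kmer_counts, kmer_positions
-- ===== Notes on version B (the rewrite author's own statement) =====
-- stated objective: alternative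
-- what changed: B replaces A's per-window is_valid_kmer rescan of every slice by a per-read running run-length of consecutive A/T/G/C bases, emitting a window exactly when the run ending at its last base has length >= k; the count/position updates are unchanged.
-- outside the precondition, e.g. on analyze_kmers([''], 0): A returns ({'': 1}, {'': [(0, 0, 0)]}), B returns ({}, {})
import Mathlib
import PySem

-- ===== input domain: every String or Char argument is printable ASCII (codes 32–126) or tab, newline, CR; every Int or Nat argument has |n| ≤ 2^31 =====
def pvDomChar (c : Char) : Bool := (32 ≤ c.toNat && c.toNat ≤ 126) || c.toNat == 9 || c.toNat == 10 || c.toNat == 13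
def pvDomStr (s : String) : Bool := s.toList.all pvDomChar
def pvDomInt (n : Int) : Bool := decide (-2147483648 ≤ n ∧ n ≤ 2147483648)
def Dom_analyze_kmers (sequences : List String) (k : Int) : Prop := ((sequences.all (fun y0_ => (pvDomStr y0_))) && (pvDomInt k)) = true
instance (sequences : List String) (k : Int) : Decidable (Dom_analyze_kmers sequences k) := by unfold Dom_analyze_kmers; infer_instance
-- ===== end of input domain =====

-- B decides window validity from a per-read running run-length of valid bases instead of A's per-window rescan (alternative decomposition, same cost class); A = B proved for every k ≥ 1 (Pre_); k ≤ 0 excluded as a degenerate corner where both bookkeepings of empty windows are accidental.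



-- ===== PORT A =====

-- `base in 'ATGC'` for a single character is character membership
def pvIsACGT (base : Char) : Bool := ['A', 'T', 'G', 'C'].contains base

def reverse_complement (seq : String) : String :=
  -- ''.join(complement.get(base, 'N') for base in reversed(seq))
  String.ofList (seq.toList.reverse.map (fun base =>
    (PySem.Dict.ofList [('A','T'), ('T','A'), ('G','C'), ('C','G'), ('N','N')]).getD base 'N'))

def get_canonical_kmer (kmer : String) : String :=
  let rev_comp := reverse_complement kmer
  -- min(kmer, rev_comp): Python's string order is code-point lexicographic, as is Lean's String order
  if rev_comp < kmer then rev_comp else kmer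

def is_valid_kmer (kmer : String) : Bool :=
  kmer.toList.all pvIsACGT

def analyze_kmers (sequences : List String) (k : Int) :
    (List (String × Int)) × (List (String × List (Int × Int × Int))) :=
  let res :=
    (PySem.List.enumerate sequences 0).foldl (fun st (p : Int × String) =>
      let read_id := p.1
      let seq := p.2
      (PySem.List.pyRange 0 (PySem.Str.len seq - k + 1) 1).foldl (fun st pos =>
        let kmer := PySem.Str.slice seq (some pos) (some (pos + k))
        if is_valid_kmer kmer then
          let canonical := get_canonical_kmer kmer
          let direction : Int := if kmer = canonical then 0 else 1
          (st.1.modify canonical 0 (· + 1),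
           st.2.modify canonical [] (· ++ [(read_id, pos, direction)]))
        else st) st)
      ((PySem.Dict.empty : PySem.Dict String Int),
       (PySem.Dict.empty : PySem.Dict String (List (Int × Int × Int))))
  (res.1.items, res.2.items)

-- ===== PORT B =====

def analyze_kmers_alt (sequences : List String) (k : Int) :
    (List (String × Int)) × (List (String × List (Int × Int × Int))) :=
  let res :=
    (PySem.List.enumerate sequences 0).foldl (fun st (p : Int × String) =>
      let read_id := p.1
      let seq := p.2
      let runs : List Int :=
        (seq.toList.foldl (fun (acc : List Int × Int) ch =>
          let cur := if pvIsACGT ch then acc.2 + 1 else 0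
          (acc.1 ++ [cur], cur)) ([], 0)).1
      (PySem.List.enumerate runs 0).foldl (fun st q =>
        if k ≤ q.2 then
          let pos := q.1 - k + 1
          let kmer := PySem.Str.slice seq (some pos) (some (pos + k))
          let rc := reverse_complement kmer
          let canonical := if kmer ≤ rc then kmer else rc
          (st.1.insert canonical (st.1.getD canonical 0 + 1),
           st.2.modify canonical [] (· ++ [(read_id, pos, if kmer = canonical then 0 else 1)]))
        else st) st)
      ((PySem.Dict.empty : PySem.Dict String Int),
       (PySem.Dict.empty : PySem.Dict String (List (Int × Int × Int))))
  (res.1.items, res.2.items)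

-- ===== PRECONDITION & SPEC =====
-- Pre_ excludes non-positive k, on which A still returns a value: every window slice is then
-- the empty string, so A degenerately counts len(seq)-k+1 empty-string "k-mers" per read while
-- B (which indexes windows by their last base) counts len(seq) of them — a corner no caller
-- uses and on which both bookkeepings of empty windows are equally accidental.
def Pre_analyze_kmers (sequences : List String) (k : Int) : Prop := 1 ≤ k
instance (sequences : List String) (k : Int) : Decidable (Pre_analyze_kmers sequences k) := by
  unfold Pre_analyze_kmers; infer_instance

def pvWitness_analyze_kmers : List String × Int := (["ACGT", "ANT"], 2)

def Spec_analyze_kmers (sequences : List String) (k : Int)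
    (out : (List (String × Int)) × (List (String × List (Int × Int × Int)))) : Prop :=
  out = analyze_kmers_alt sequences k
instance (sequences : List String) (k : Int)
    (out : (List (String × Int)) × (List (String × List (Int × Int × Int)))) :
    Decidable (Spec_analyze_kmers sequences k out) := by unfold Spec_analyze_kmers; infer_instance

-- ===== CLAIM (what is proved, stated in full; the proofs are below) =====
def Claim_equal_analyze_kmers : Prop :=
  ∀ (sequences : List String) (k : Int), Dom_analyze_kmers sequences k →
    Pre_analyze_kmers sequences k → Spec_analyze_kmers sequences k (analyze_kmers sequences k)

-- ===== LEMMAS AND PROOFS =====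

def pvTrail (cs : List Char) : Int := cs.foldl (fun c ch => if pvIsACGT ch then c + 1 else 0) 0

theorem pvTrail_append (cs : List Char) (c : Char) :
    pvTrail (cs ++ [c]) = if pvIsACGT c then pvTrail cs + 1 else 0 := by
  simp [pvTrail, List.foldl_append]

theorem pvTrail_bounds (cs : List Char) : 0 ≤ pvTrail cs ∧ pvTrail cs ≤ cs.length := by
  induction cs using List.reverseRecOn with
  | nil => simp [pvTrail]
  | append_singleton cs c ih =>
      rw [pvTrail_append]
      split <;> simp <;> omega

theorem pvTrail_ge_iff (cs : List Char) (t : Nat) :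
    ((t : Int) ≤ pvTrail cs) ↔ (t ≤ cs.length ∧ (cs.drop (cs.length - t)).all pvIsACGT = true) := by
  induction cs using List.reverseRecOn generalizing t with
  | nil => simp [pvTrail]
  | append_singleton cs c ih =>
      rw [pvTrail_append]
      by_cases hc : pvIsACGT c = true
      · rw [if_pos hc]
        cases t with
        | zero =>
            simp only [Nat.cast_zero]
            constructor
            · intro _; constructor; · omega
              · simp
            · intro _; have := pvTrail_bounds cs; omega
        | succ s =>
            have harith : cs.length + 1 - (s + 1) = cs.length - s := by omega
            constructor
            · intro h
              have hs : (s : Int) ≤ pvTrail cs := by push_cast at h ⊢; omega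
              obtain ⟨h1, h2⟩ := (ih s).mp hs
              refine ⟨by simp; omega, ?_⟩
              rw [List.length_append, List.length_singleton, harith,
                List.drop_append_of_le_length (by omega), List.all_append]
              simp [h2, hc]
            · rintro ⟨h1, h2⟩
              rw [List.length_append, List.length_singleton, harith,
                List.drop_append_of_le_length (by omega), List.all_append] at h2
              simp only [Bool.and_eq_true] at h2
              have h1' : s + 1 ≤ cs.length + 1 := by simpa using h1
              have := (ih s).mpr ⟨by omega, h2.1⟩
              push_cast; omega
      · rw [if_neg hc]
        constructor
        · intro h
          have : t = 0 := by omega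
          subst this
          simp
        · rintro ⟨h1, h2⟩
          rcases Nat.eq_zero_or_pos t with h0 | h0
          · subst h0; simp
          · exfalso
            have hd : cs.length + 1 - t ≤ cs.length := by simp at h1 ⊢; omega
            rw [List.length_append, List.length_singleton,
              List.drop_append_of_le_length hd, List.all_append] at h2
            simp [hc] at h2

-- runs list characterization

theorem pvRuns_eq (cs : List Char) :
    cs.foldl (fun (acc : List Int × Int) ch =>
        let cur := if pvIsACGT ch then acc.2 + 1 else 0
        (acc.1 ++ [cur], cur)) ([], 0)
      = ((List.range cs.length).map (fun i => pvTrail (cs.take (i+1))), pvTrail cs) := by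
  induction cs using List.reverseRecOn with
  | nil => simp [pvTrail]
  | append_singleton cs c ih =>
      rw [List.foldl_append, ih]
      simp only [List.foldl_cons, List.foldl_nil]
      rw [List.length_append, List.length_singleton, List.range_succ, List.map_append]
      rw [Prod.mk.injEq]
      constructor
      · congr 1
        · apply List.map_congr_left
          intro i hi
          rw [List.mem_range] at hi
          rw [List.take_append_of_le_length (by omega)]
        · simp only [List.map_cons, List.map_nil]
          rw [List.take_of_length_le (by simp), pvTrail_append]
      · rw [pvTrail_append]

-- shifted filter of a range

theorem pvShift (L d : Nat) (p : Nat → Bool) :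
    ((List.range L).filter (fun i => decide (d ≤ i) && p (i - d))).map (fun i => i - d)
      = (List.range (L - d)).filter p := by
  induction L with
  | zero => simp
  | succ n ih =>
      rw [List.range_succ, List.filter_append, List.map_append, ih]
      by_cases hd : d ≤ n
      · have : n + 1 - d = (n - d) + 1 := by omega
        rw [this, List.range_succ, List.filter_append]
        simp only [List.filter_cons, List.filter_nil, decide_eq_true hd, Bool.true_and]
        by_cases hp : p (n - d) = true <;> simp [hp]
      · have h1 : n + 1 - d = n - d := by omega
        rw [h1]
        simp [decide_eq_false (by omega : ¬ d ≤ n)]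

abbrev pvKSt := PySem.Dict String Int × PySem.Dict String (List (Int × Int × Int))

def pvStep (read_id : Int) (seq : String) (k : Int) (st : pvKSt) (pos : Int) : pvKSt :=
  let kmer := PySem.Str.slice seq (some pos) (some (pos + k))
  let canonical := get_canonical_kmer kmer
  (st.1.modify canonical 0 (· + 1),
   st.2.modify canonical [] (· ++ [(read_id, pos, if kmer = canonical then 0 else 1)]))

theorem pvCanon_eq (kmer : String) :
    (if kmer ≤ reverse_complement kmer then kmer else reverse_complement kmer)
      = get_canonical_kmer kmer := by
  unfold get_canonical_kmer
  by_cases h : kmer ≤ reverse_complement kmer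
  · simp only [if_pos h, if_neg (not_lt.mpr h)]
  · simp only [if_neg h, if_pos (not_le.mp h)]

theorem pvWin_eq (seq : String) (k : Int) (k' : Nat) (hk : k = (k' : Int)) (p : Nat) :
    is_valid_kmer (PySem.Str.slice seq (some (p : Int)) (some ((p : Int) + k)))
      = ((seq.toList.drop p).take k').all pvIsACGT := by
  subst hk
  simp only [is_valid_kmer, PySem.Str.toList_slice, PySem.Chars.slice_eq_listSlice,
    PySem.List.slice_natCast_add]

theorem pvEnumerate_map_range (L : Nat) (g : Nat → Int) :
    PySem.List.enumerate ((List.range L).map g) 0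
      = (List.range L).map (fun (i : Nat) => ((i : Int), g i)) := by
  induction L with
  | zero => simp
  | succ n ih => rw [List.range_succ]; simp [PySem.List.enumerate_append, ih]

theorem pvList_eq (cs : List Char) (k : Int) (k' : Nat) (hkk : k = (k' : Int)) (hk1 : 1 ≤ k') :
    ((List.range cs.length).filter
        (fun i => decide (k ≤ pvTrail (cs.take (i+1))))).map (fun (i : Nat) => ((i : Int) - k + 1))
      = ((List.range (cs.length + 1 - k')).filter
          (fun p => ((cs.drop p).take k').all pvIsACGT)).map (fun (p : Nat) => (p : Int)) := by
  subst hkk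
  have hfc : ∀ i ∈ List.range cs.length,
      (decide ((k' : Int) ≤ pvTrail (cs.take (i+1))))
        = (decide (k' - 1 ≤ i) && ((cs.drop (i - (k' - 1))).take k').all pvIsACGT) := by
    intro i hi
    rw [List.mem_range] at hi
    have hlen : (cs.take (i+1)).length = i + 1 := by
      rw [List.length_take]; omega
    rw [Bool.eq_iff_iff]
    simp only [decide_eq_true_eq, Bool.and_eq_true]
    rw [pvTrail_ge_iff (cs.take (i+1)) k', hlen]
    by_cases hki : k' ≤ i + 1
    · rw [List.drop_take]
      have h2 : i + 1 - (i + 1 - k') = k' := by omega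
      have h1 : i + 1 - k' = i - (k' - 1) := by omega
      rw [h2, h1]
      constructor
      · rintro ⟨_, h⟩; exact ⟨by omega, h⟩
      · rintro ⟨_, h⟩; exact ⟨hki, h⟩
    · constructor
      · rintro ⟨h, _⟩; omega
      · rintro ⟨h, _⟩; omega
  rw [List.filter_congr hfc]
  have hshift := pvShift cs.length (k' - 1) (fun p => ((cs.drop p).take k').all pvIsACGT)
  have hM : cs.length + 1 - k' = cs.length - (k' - 1) := by omega
  rw [hM, ← hshift, List.map_map]
  apply List.map_congr_left
  intro i hi
  have hge : k' - 1 ≤ i := by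
    have := (List.mem_filter.mp hi).2
    simp only [Bool.and_eq_true, decide_eq_true_eq] at this
    exact this.1
  simp only [Function.comp_apply]
  omega

theorem pvInner_eq (read_id k : Int) (hk : 1 ≤ k) (seq : String) (st : pvKSt) :
    (PySem.List.enumerate ((seq.toList.foldl (fun (acc : List Int × Int) ch =>
          let cur := if pvIsACGT ch then acc.2 + 1 else 0
          (acc.1 ++ [cur], cur)) ([], 0)).1 : List Int) 0).foldl (fun st q =>
        if k ≤ q.2 then
          let pos := q.1 - k + 1
          let kmer := PySem.Str.slice seq (some pos) (some (pos + k))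
          let rc := reverse_complement kmer
          let canonical := if kmer ≤ rc then kmer else rc
          (st.1.insert canonical (st.1.getD canonical 0 + 1),
           st.2.modify canonical [] (· ++ [(read_id, pos, if kmer = canonical then 0 else 1)]))
        else st) st
    = (PySem.List.pyRange 0 (PySem.Str.len seq - k + 1) 1).foldl (fun st pos =>
        let kmer := PySem.Str.slice seq (some pos) (some (pos + k))
        if is_valid_kmer kmer then
          let canonical := get_canonical_kmer kmer
          let direction : Int := if kmer = canonical then 0 else 1
          (st.1.modify canonical 0 (· + 1),
           st.2.modify canonical [] (· ++ [(read_id, pos, direction)]))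
        else st) st := by
  -- names and abbreviations
  set cs := seq.toList with hcs
  set L := cs.length with hL
  set k' := k.toNat with hk'
  have hkk : k = (k' : Int) := by omega
  have hk1 : 1 ≤ k' := by omega
  have hB : (fun (st : pvKSt) (q : Int × Int) =>
        if k ≤ q.2 then
          let pos := q.1 - k + 1
          let kmer := PySem.Str.slice seq (some pos) (some (pos + k))
          let rc := reverse_complement kmer
          let canonical := if kmer ≤ rc then kmer else rc
          ((st.1.insert canonical (st.1.getD canonical 0 + 1),
           st.2.modify canonical [] (· ++ [(read_id, q.1 - k + 1, if kmer = canonical then 0 else 1)])) : pvKSt)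
        else st)
      = (fun st q => if k ≤ q.2 then pvStep read_id seq k st (q.1 - k + 1) else st) := by
    funext st q
    by_cases h : k ≤ q.2
    · simp only [if_pos h, pvStep, pvCanon_eq]
      rfl
    · simp only [if_neg h]
  have hA : (fun (st : pvKSt) (pos : Int) =>
        let kmer := PySem.Str.slice seq (some pos) (some (pos + k))
        if is_valid_kmer kmer then
          let canonical := get_canonical_kmer kmer
          let direction : Int := if kmer = canonical then 0 else 1
          ((st.1.modify canonical 0 (· + 1),
           st.2.modify canonical [] (· ++ [(read_id, pos, direction)])) : pvKSt)
        else st)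
      = (fun st pos => if is_valid_kmer (PySem.Str.slice seq (some pos) (some (pos + k)))
          then pvStep read_id seq k st pos else st) := rfl
  rw [hB, hA]
  have hruns : ((seq.toList.foldl (fun (acc : List Int × Int) ch =>
          let cur := if pvIsACGT ch then acc.2 + 1 else 0
          (acc.1 ++ [cur], cur)) ([], 0)).1 : List Int)
      = (List.range L).map (fun i => pvTrail (cs.take (i+1))) := by
    rw [← hcs, pvRuns_eq]
  rw [hruns, pvEnumerate_map_range, PySem.List.foldl_ite_eq_foldl_filter
        (p := fun (q : Int × Int) => k ≤ q.2),
      PySem.List.foldl_ite_eq_foldl_filter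
        (p := fun pos => is_valid_kmer (PySem.Str.slice seq (some pos) (some (pos + k))) = true),
      List.filter_map, List.foldl_map]
  have hR : PySem.List.pyRange 0 (PySem.Str.len seq - k + 1) 1
      = (List.range (L + 1 - k')).map (fun (j : Nat) => (j : Int)) := by
    rw [PySem.Str.len_eq, ← hcs, ← hL]
    by_cases hc : k' ≤ L + 1
    · have : (L : Int) - k + 1 = ((L + 1 - k' : Nat) : Int) := by omega
      rw [this, PySem.List.pyRange_zero_natCast]
    · have h0 : L + 1 - k' = 0 := by omega
      rw [h0]
      apply List.eq_nil_iff_forall_not_mem.mpr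
      intro x hx
      rw [PySem.List.mem_pyRange_one] at hx
      omega
  rw [hR, List.filter_map, List.foldl_map]
  have hfilt : ∀ p ∈ List.range (L + 1 - k'),
      ((fun pos => decide (is_valid_kmer (PySem.Str.slice seq (some pos) (some (pos + k))) = true)) ∘
        (fun (j : Nat) => (j : Int))) p
      = ((cs.drop p).take k').all pvIsACGT := by
    intro p _
    simp only [Function.comp_apply]
    rw [pvWin_eq seq k k' hkk p, ← hcs]
    rw [Bool.eq_iff_iff]
    simp [List.all_eq_true]
  rw [List.filter_congr hfilt]
  have hLHS := pvList_eq cs k k' hkk hk1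
  rw [← hL] at hLHS
  calc List.foldl (fun st (i : Nat) => pvStep read_id seq k st ((i : Int) - k + 1)) st
        ((List.range L).filter (fun i => decide (k ≤ pvTrail (cs.take (i+1)))))
      = List.foldl (pvStep read_id seq k) st
          (((List.range L).filter (fun i => decide (k ≤ pvTrail (cs.take (i+1))))).map
            (fun (i : Nat) => ((i : Int) - k + 1))) := by rw [List.foldl_map]
    _ = List.foldl (pvStep read_id seq k) st
          (((List.range (L + 1 - k')).filter
            (fun p => ((cs.drop p).take k').all pvIsACGT)).map (fun (p : Nat) => (p : Int))) := by
            rw [hLHS]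
    _ = _ := by rw [List.foldl_map]

theorem pv_main (sequences : List String) (k : Int) (hk : 1 ≤ k) :
    analyze_kmers sequences k = analyze_kmers_alt sequences k := by
  unfold analyze_kmers analyze_kmers_alt
  rw [PySem.List.foldl_congr_mem (PySem.List.enumerate sequences 0) _ _ _
    (fun acc p _ => (pvInner_eq p.1 k hk p.2 acc).symm)]


-- ===== VERDICT (by name: the statement is the Claim_ definition above) =====
theorem analyze_kmers_spec : Claim_equal_analyze_kmers := by
  intro sequences k _ hk
  show analyze_kmers sequences k = analyze_kmers_alt sequences k
  exact pv_main sequences k hk
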